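-- pv_equiv track=rewrite | github.com/logic-star-ai/swt-bench | src/grading.py | get_coverage_delta
-- ===== SOURCE A (Python) =====
-- from typing import Any, Dict, Tuple, List, Optional
--
-- def get_coverage_delta(lines: List[Tuple[str, int]], coverage_pre: [Dict[str, List[Tuple[int,int]]]], coverage_post:[Dict[str, List[Tuple[int,int]]]]) -> Dict[str, Dict[int,int]]:
--     coverage_delta = {}
--     for line in lines:
--         file_name = line[0]
--         line_number = line[1]
--         pre_coverage = coverage_pre[file_name][line_number] if file_name in coverage_pre and line_number in coverage_pre[file_name] else 0
--         post_coverage = coverage_post[file_name][line_number] if file_name in coverage_post and line_number in coverage_post[file_name] else 0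
--
--         if file_name not in coverage_delta:
--             coverage_delta[file_name] = {}
--         coverage_delta[file_name][line_number] = post_coverage - pre_coverage
--     return coverage_delta
-- ===== SOURCE B (Python) =====
-- def get_coverage_delta(lines, coverage_pre, coverage_post):
--     # distinct files in first-appearance order
--     files = []
--     for f, _ in lines:
--         if f not in files:
--             files.append(f)
--     result = {}
--     for f in files:
--         # re-scan lines for this file's distinct line numbers (first-appearance order)
--         lns = []
--         for g, ln in lines:
--             if g == f and ln not in lns:
--                 lns.append(ln)
--         result[f] = {ln: coverage_post.get(f, {}).get(ln, 0) - coverage_pre.get(f, {}).get(ln, 0)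
--                      for ln in lns}
--     return result
-- ===== Notes on version B (the rewrite author's own statement) =====
-- stated objective: alternative
-- what changed: B abandons A's single-pass dict accumulator: it first lists the distinct files in first-appearance order, then for each file re-scans the whole input to collect that file's distinct line numbers by nested list scans (no grouping dict at all), and finally computes each delta with get-chains; correctness relies on A's output order being first-appearance order and the delta depending only on the (file,line) pair.
import Mathlib
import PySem

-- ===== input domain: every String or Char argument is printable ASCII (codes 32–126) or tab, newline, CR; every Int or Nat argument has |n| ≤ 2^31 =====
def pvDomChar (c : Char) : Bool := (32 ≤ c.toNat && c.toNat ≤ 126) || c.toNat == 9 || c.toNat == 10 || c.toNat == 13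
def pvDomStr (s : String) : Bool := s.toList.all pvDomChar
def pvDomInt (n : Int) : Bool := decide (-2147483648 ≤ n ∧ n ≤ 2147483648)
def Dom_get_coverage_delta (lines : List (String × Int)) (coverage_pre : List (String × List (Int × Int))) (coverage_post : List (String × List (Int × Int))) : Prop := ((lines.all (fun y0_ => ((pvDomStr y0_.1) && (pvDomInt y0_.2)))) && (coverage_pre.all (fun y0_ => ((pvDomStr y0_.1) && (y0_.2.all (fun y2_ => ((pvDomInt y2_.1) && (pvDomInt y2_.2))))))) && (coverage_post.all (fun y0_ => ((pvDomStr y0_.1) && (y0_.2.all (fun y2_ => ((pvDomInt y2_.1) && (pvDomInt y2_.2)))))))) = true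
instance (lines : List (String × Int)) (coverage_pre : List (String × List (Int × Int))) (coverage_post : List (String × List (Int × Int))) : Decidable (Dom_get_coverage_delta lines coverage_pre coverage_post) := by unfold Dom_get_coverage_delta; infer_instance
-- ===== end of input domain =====

-- B replaces A's single-pass dict accumulator with nested list scans (distinct files, then per-file re-scan for its lines); same output, no speed claim.
-- ===== PORT A =====
-- the coverage dicts arrive as association lists; wrap them as PySem.Dict (dict semantics)
def pvWrap (cov : List (String × List (Int × Int))) : PySem.Dict String (PySem.Dict Int Int) :=
  PySem.Dict.mk (cov.map (fun p => (p.1, PySem.Dict.mk p.2)))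

def get_coverage_delta (lines : List (String × Int)) (coverage_pre : List (String × List (Int × Int))) (coverage_post : List (String × List (Int × Int))) : List (String × List (Int × Int)) :=
  let pre := pvWrap coverage_pre
  let post := pvWrap coverage_post
  let cd : PySem.Dict String (PySem.Dict Int Int) :=
    lines.foldl (fun coverage_delta line =>
      let file_name := line.1
      let line_number := line.2
      let pre_coverage := if pre.contains file_name && (pre.getD file_name PySem.Dict.empty).contains line_number then (pre.getD file_name PySem.Dict.empty).getD line_number 0 else 0
      let post_coverage := if post.contains file_name && (post.getD file_name PySem.Dict.empty).contains line_number then (post.getD file_name PySem.Dict.empty).getD line_number 0 else 0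
      let coverage_delta := if !coverage_delta.contains file_name then coverage_delta.insert file_name PySem.Dict.empty else coverage_delta
      -- coverage_delta[file_name][line_number] = post_coverage - pre_coverage  (in-place inner update)
      coverage_delta.insert file_name ((coverage_delta.getD file_name PySem.Dict.empty).insert line_number (post_coverage - pre_coverage)))
      PySem.Dict.empty
  cd.items.map (fun p => (p.1, p.2.items))

-- ===== PORT B =====
-- pass 1: files = distinct file names in first-appearance order ('if f not in files: files.append(f)')
def pvBFiles (lines : List (String × Int)) : List String :=
  lines.foldl (fun fs p => if fs.contains p.1 then fs else fs ++ [p.1]) []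

-- per-file re-scan: 'for g, ln in lines: if g == f and ln not in lns: lns.append(ln)'
def pvBLines (f : String) (lines : List (String × Int)) : List Int :=
  lines.foldl (fun ls p => if p.1 == f && !ls.contains p.2 then ls ++ [p.2] else ls) []

def get_coverage_delta_alt (lines : List (String × Int)) (coverage_pre : List (String × List (Int × Int))) (coverage_post : List (String × List (Int × Int))) : List (String × List (Int × Int)) :=
  let pre := pvWrap coverage_pre
  let post := pvWrap coverage_post
  (pvBFiles lines).map (fun f => (f,
    (pvBLines f lines).map (fun ln =>
      (ln, (post.getD f PySem.Dict.empty).getD ln 0 - (pre.getD f PySem.Dict.empty).getD ln 0))))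

-- ===== PRECONDITION & SPEC =====
def Spec_get_coverage_delta (lines : List (String × Int)) (coverage_pre : List (String × List (Int × Int))) (coverage_post : List (String × List (Int × Int))) (out : List (String × List (Int × Int))) : Prop := out = get_coverage_delta_alt lines coverage_pre coverage_post
instance (lines : List (String × Int)) (coverage_pre : List (String × List (Int × Int))) (coverage_post : List (String × List (Int × Int))) (out : List (String × List (Int × Int))) : Decidable (Spec_get_coverage_delta lines coverage_pre coverage_post out) := by unfold Spec_get_coverage_delta; infer_instance

-- ===== CLAIM (what is proved, stated in full; the proofs are below) =====
def Claim_equal_get_coverage_delta : Prop := ∀ (lines : List (String × Int)) (coverage_pre : List (String × List (Int × Int))) (coverage_post : List (String × List (Int × Int))), Dom_get_coverage_delta lines coverage_pre coverage_post → Spec_get_coverage_delta lines coverage_pre coverage_post (get_coverage_delta lines coverage_pre coverage_post)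

-- ===== LEMMAS AND PROOFS =====

-- map a key-dependent function over the values of a dict (proof-side gadget relating A's accumulator to the grouping index)
def pvMapVal {κ α β : Type} (g : κ → α → β) (d : PySem.Dict κ α) : PySem.Dict κ β :=
  PySem.Dict.mk (d.items.map (fun p => (p.1, g p.1 p.2)))

theorem pvMapVal_keys {κ α β : Type} (g : κ → α → β) (d : PySem.Dict κ α) :
    (pvMapVal g d).keys = d.keys := by
  simp [pvMapVal, PySem.Dict.keys]

theorem pvMapVal_contains {κ α β : Type} [BEq κ] [LawfulBEq κ] [DecidableEq κ] (g : κ → α → β) (d : PySem.Dict κ α) (k : κ) :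
    (pvMapVal g d).contains k = d.contains k := by
  rw [PySem.Dict.contains_eq_decide_mem_keys, PySem.Dict.contains_eq_decide_mem_keys, pvMapVal_keys]

theorem pvMapVal_get? {κ α β : Type} [BEq κ] [LawfulBEq κ] (g : κ → α → β) (l : List (κ × α)) (k : κ) :
    (pvMapVal g (PySem.Dict.mk l)).get? k = ((PySem.Dict.mk l).get? k).map (fun v => g k v) := by
  induction l with
  | nil => simp [pvMapVal, PySem.Dict.get?]
  | cons p rest ih =>
    have hmk : pvMapVal g (PySem.Dict.mk (p :: rest)) = PySem.Dict.mk ((p.1, g p.1 p.2) :: rest.map (fun q => (q.1, g q.1 q.2))) := by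
      simp [pvMapVal]
    rw [hmk, PySem.Dict.get?_mk_cons, PySem.Dict.get?_mk_cons]
    by_cases h : (p.1 == k) = true
    · have hk : p.1 = k := eq_of_beq h
      subst hk; simp
    · simp only [if_neg h]
      rw [show PySem.Dict.mk (rest.map (fun q => (q.1, g q.1 q.2))) = pvMapVal g (PySem.Dict.mk rest) from rfl]
      exact ih

theorem pvMapVal_getD {κ α β : Type} [BEq κ] [LawfulBEq κ] (g : κ → α → β) (d : PySem.Dict κ α) (k : κ) (d0 : α) :
    (pvMapVal g d).getD k (g k d0) = g k (d.getD k d0) := by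
  obtain ⟨l⟩ := d
  rw [PySem.Dict.getD_eq_get?_getD, PySem.Dict.getD_eq_get?_getD, pvMapVal_get?]
  cases (PySem.Dict.mk l : PySem.Dict κ α).get? k <;> simp

theorem pvMapVal_insert {κ α β : Type} [BEq κ] [LawfulBEq κ] [DecidableEq κ] (g : κ → α → β) (d : PySem.Dict κ α) (k : κ) (v : α) :
    pvMapVal g (d.insert k v) = (pvMapVal g d).insert k (g k v) := by
  apply PySem.Dict.ext
  by_cases h : d.contains k = true
  · rw [show (pvMapVal g (d.insert k v)).items = (d.insert k v).items.map (fun p => (p.1, g p.1 p.2)) from rfl,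
      PySem.Dict.items_insert_of_contains d v h,
      PySem.Dict.items_insert_of_contains (pvMapVal g d) (g k v) (by rw [pvMapVal_contains]; exact h)]
    rw [show (pvMapVal g d).items = d.items.map (fun p => (p.1, g p.1 p.2)) from rfl]
    rw [List.map_map, List.map_map]
    refine List.map_congr_left ?_
    intro p _
    by_cases hp : (p.1 == k) = true
    · have : p.1 = k := eq_of_beq hp
      simp [Function.comp, this]
    · simp [Function.comp, hp]
  · rw [show (pvMapVal g (d.insert k v)).items = (d.insert k v).items.map (fun p => (p.1, g p.1 p.2)) from rfl,
      PySem.Dict.items_insert_of_not_contains d v (by simpa using h),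
      PySem.Dict.items_insert_of_not_contains (pvMapVal g d) (g k v) (by rw [pvMapVal_contains]; simpa using h)]
    simp [pvMapVal]

-- the per-(file,line) delta both programs compute
def pvDelta (pre post : PySem.Dict String (PySem.Dict Int Int)) (f : String) (ln : Int) : Int :=
  (post.getD f PySem.Dict.empty).getD ln 0 - (pre.getD f PySem.Dict.empty).getD ln 0

-- A's guarded lookup equals the getD-of-getD lookup
theorem pvLookup_eq (cov : PySem.Dict String (PySem.Dict Int Int)) (f : String) (ln : Int) :
    (if cov.contains f && (cov.getD f PySem.Dict.empty).contains ln then (cov.getD f PySem.Dict.empty).getD ln 0 else 0)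
      = (cov.getD f PySem.Dict.empty).getD ln 0 := by
  by_cases h1 : cov.contains f = true
  · by_cases h2 : (cov.getD f PySem.Dict.empty).contains ln = true
    · simp [h1, h2]
    · simp [h1, h2, PySem.Dict.getD_of_not_contains _ _ (by simpa using h2)]
  · have : cov.getD f PySem.Dict.empty = PySem.Dict.empty :=
      PySem.Dict.getD_of_not_contains _ _ (by simpa using h1)
    simp [h1, this]

-- A's loop body: the "ensure key exists, then assign into it" pair collapses into one insert
theorem pvEnsure_insert (cd : PySem.Dict String (PySem.Dict Int Int)) (f : String) (ln : Int) (v : Int) :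
    (if !cd.contains f then cd.insert f PySem.Dict.empty else cd).insert f
        (((if !cd.contains f then cd.insert f PySem.Dict.empty else cd).getD f PySem.Dict.empty).insert ln v)
      = cd.insert f ((cd.getD f PySem.Dict.empty).insert ln v) := by
  by_cases h : cd.contains f = true
  · simp [h]
  · have h' : cd.contains f = false := by simpa using h
    simp [h', PySem.Dict.getD_insert_self, PySem.Dict.insert_insert_self,
      PySem.Dict.getD_of_not_contains cd PySem.Dict.empty h']

-- the grouping index corresponding to A's accumulator keys
def pvIdx (lines : List (String × Int)) : PySem.Dict String (PySem.Dict Int Unit) :=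
  lines.foldl (fun idx p => idx.insert p.1 ((idx.getD p.1 PySem.Dict.empty).insert p.2 ())) PySem.Dict.empty

-- Φ: A's accumulator is the grouping index with pvDelta mapped over it
def pvPhi (pre post : PySem.Dict String (PySem.Dict Int Int)) (idx : PySem.Dict String (PySem.Dict Int Unit)) : PySem.Dict String (PySem.Dict Int Int) :=
  pvMapVal (fun f _m => pvMapVal (fun ln _ => pvDelta pre post f ln) _m) idx

theorem pvStep_comm (pre post : PySem.Dict String (PySem.Dict Int Int)) (idx : PySem.Dict String (PySem.Dict Int Unit)) (f : String) (ln : Int) :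
    (pvPhi pre post idx).insert f (((pvPhi pre post idx).getD f PySem.Dict.empty).insert ln (pvDelta pre post f ln))
      = pvPhi pre post (idx.insert f ((idx.getD f PySem.Dict.empty).insert ln ())) := by
  unfold pvPhi
  rw [pvMapVal_insert, pvMapVal_insert]
  congr 1
  have h := pvMapVal_getD (fun f' m => pvMapVal (fun ln' _ => pvDelta pre post f' ln') m) idx f PySem.Dict.empty
  rw [show pvMapVal (fun ln' (_ : Unit) => pvDelta pre post f ln') (PySem.Dict.empty : PySem.Dict Int Unit) = PySem.Dict.empty from rfl] at h
  rw [h]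

theorem pvFold_comm (pre post : PySem.Dict String (PySem.Dict Int Int)) (lines : List (String × Int)) (idx : PySem.Dict String (PySem.Dict Int Unit)) :
    lines.foldl (fun coverage_delta line =>
      let file_name := line.1
      let line_number := line.2
      let pre_coverage := if pre.contains file_name && (pre.getD file_name PySem.Dict.empty).contains line_number then (pre.getD file_name PySem.Dict.empty).getD line_number 0 else 0
      let post_coverage := if post.contains file_name && (post.getD file_name PySem.Dict.empty).contains line_number then (post.getD file_name PySem.Dict.empty).getD line_number 0 else 0
      let coverage_delta := if !coverage_delta.contains file_name then coverage_delta.insert file_name PySem.Dict.empty else coverage_delta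
      coverage_delta.insert file_name ((coverage_delta.getD file_name PySem.Dict.empty).insert line_number (post_coverage - pre_coverage)))
      (pvPhi pre post idx)
    = pvPhi pre post (lines.foldl (fun idx p => idx.insert p.1 ((idx.getD p.1 PySem.Dict.empty).insert p.2 ())) idx) := by
  induction lines generalizing idx with
  | nil => rfl
  | cons p rest ih =>
    simp only [List.foldl_cons]
    rw [pvLookup_eq pre p.1 p.2, pvLookup_eq post p.1 p.2,
      pvEnsure_insert (pvPhi pre post idx) p.1 p.2
        ((post.getD p.1 PySem.Dict.empty).getD p.2 0 - (pre.getD p.1 PySem.Dict.empty).getD p.2 0),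
      show ((post.getD p.1 PySem.Dict.empty).getD p.2 0 - (pre.getD p.1 PySem.Dict.empty).getD p.2 0) = pvDelta pre post p.1 p.2 from rfl,
      pvStep_comm pre post idx p.1 p.2]
    exact ih _

-- ===== characterisation of the grouping index by B's nested scans =====

-- membership in the distinct-files accumulator
theorem pvBFiles_mem_aux (l : List (String × Int)) (fs : List String) (f : String) :
    f ∈ l.foldl (fun fs p => if fs.contains p.1 then fs else fs ++ [p.1]) fs ↔ f ∈ fs ∨ f ∈ l.map Prod.fst := by
  induction l generalizing fs with
  | nil => simp
  | cons p rest ih =>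
    simp only [List.foldl_cons, List.map_cons, List.mem_cons]
    by_cases h : fs.contains p.1 = true
    · rw [if_pos h, ih]
      constructor
      · rintro (h1 | h2)
        · exact Or.inl h1
        · exact Or.inr (Or.inr h2)
      · rintro (h1 | h1 | h2)
        · exact Or.inl h1
        · subst h1; exact Or.inl (by simpa using h)
        · exact Or.inr h2
    · rw [if_neg h, ih]
      simp only [List.mem_append, List.mem_singleton]
      tauto

theorem pvBFiles_mem (l : List (String × Int)) (f : String) :
    f ∈ pvBFiles l ↔ f ∈ l.map Prod.fst := by
  rw [pvBFiles, pvBFiles_mem_aux]; simp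

-- if a file never occurs in l, its line scan is empty
theorem pvBLines_nil (f : String) (l : List (String × Int)) (h : f ∉ l.map Prod.fst) :
    pvBLines f l = [] := by
  unfold pvBLines
  induction l with
  | nil => rfl
  | cons p rest ih =>
    simp only [List.map_cons, List.mem_cons, not_or] at h
    simp only [List.foldl_cons]
    have hpf : (p.1 == f) = false := by
      simp only [beq_eq_false_iff_ne]; exact fun hp => h.1 hp.symm
    simp only [hpf, Bool.false_and, Bool.false_eq_true, if_false]
    exact ih h.2

-- appending one line to the scans
theorem pvBFiles_append (l : List (String × Int)) (p : String × Int) :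
    pvBFiles (l ++ [p]) = if (pvBFiles l).contains p.1 then pvBFiles l else pvBFiles l ++ [p.1] := by
  unfold pvBFiles; rw [List.foldl_append]; rfl

theorem pvBLines_append (f : String) (l : List (String × Int)) (p : String × Int) :
    pvBLines f (l ++ [p]) = if p.1 == f && !(pvBLines f l).contains p.2 then pvBLines f l ++ [p.2] else pvBLines f l := by
  unfold pvBLines; rw [List.foldl_append]; rfl

-- first-match lookup in a key-determined mapped list needs no nodup
theorem pvGet?_mk_map {ν : Type} (g : String → ν) (fs : List String) (k : String) :
    (PySem.Dict.mk (fs.map (fun f => (f, g f)))).get? k = if fs.contains k then some (g k) else none := by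
  induction fs with
  | nil => simp [PySem.Dict.get?]
  | cons f rest ih =>
    simp only [List.map_cons, PySem.Dict.get?_mk_cons, List.contains_cons]
    by_cases h : (f == k) = true
    · have : f = k := eq_of_beq h
      subst this; simp
    · rw [if_neg h, ih]
      have : (k == f) = false := by
        simp only [beq_eq_false_iff_ne]
        intro hk; exact h (by subst hk; simp)
      simp [this]

-- the grouping index's items are exactly B's nested scans
theorem pvIdx_items (lines : List (String × Int)) :
    (pvIdx lines).items
      = (pvBFiles lines).map (fun f => (f, PySem.Dict.mk ((pvBLines f lines).map (fun ln => (ln, ()))))) := by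
  induction lines using List.reverseRecOn with
  | nil => rfl
  | append_singleton l p ih =>
    have hidx : pvIdx (l ++ [p]) = (pvIdx l).insert p.1 (((pvIdx l).getD p.1 PySem.Dict.empty).insert p.2 ()) := by
      unfold pvIdx; rw [List.foldl_append]; rfl
    -- idx as a literal dict over B's scans
    have hmk : pvIdx l = PySem.Dict.mk ((pvBFiles l).map (fun f => (f, PySem.Dict.mk ((pvBLines f l).map (fun ln => (ln, ())))))) := by
      apply PySem.Dict.ext; rw [ih]
    have hget : (pvIdx l).get? p.1
        = if (pvBFiles l).contains p.1 then some (PySem.Dict.mk ((pvBLines p.1 l).map (fun ln => (ln, ())))) else none := by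
      rw [hmk]; exact pvGet?_mk_map _ _ _
    have hcont : (pvIdx l).contains p.1 = (pvBFiles l).contains p.1 := by
      rw [PySem.Dict.contains_eq_isSome_get?, hget]
      cases hb : (pvBFiles l).contains p.1 <;> simp
    by_cases hf : (pvBFiles l).contains p.1 = true
    · -- file already present: in-place update of its inner dict
      have hgetD : (pvIdx l).getD p.1 PySem.Dict.empty = PySem.Dict.mk ((pvBLines p.1 l).map (fun ln => (ln, ()))) := by
        rw [PySem.Dict.getD_eq_get?_getD, hget, if_pos hf]; rfl
      have hinner : (((pvIdx l).getD p.1 PySem.Dict.empty).insert p.2 ())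
          = PySem.Dict.mk ((pvBLines p.1 (l ++ [p])).map (fun ln => (ln, ()))) := by
        rw [hgetD]
        apply PySem.Dict.ext
        rw [pvBLines_append p.1 l p]
        by_cases hl : (pvBLines p.1 l).contains p.2 = true
        · have hmem : p.2 ∈ pvBLines p.1 l := by simpa using hl
          have hc : (PySem.Dict.mk ((pvBLines p.1 l).map (fun ln => (ln, (() : Unit))))).contains p.2 = true := by
            simp only [PySem.Dict.contains_mk]
            simpa using hmem
          rw [PySem.Dict.items_insert_of_contains _ _ hc]
          simp only [hl, BEq.rfl, Bool.not_true, Bool.and_false, Bool.false_eq_true, if_false]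
          rw [List.map_map]
          refine List.map_congr_left ?_
          intro ln _
          by_cases h2 : (ln == p.2) = true
          · have : ln = p.2 := eq_of_beq h2
            simp [Function.comp, this]
          · simp [Function.comp, h2]
        · have hmem : p.2 ∉ pvBLines p.1 l := by simpa using hl
          have hc : (PySem.Dict.mk ((pvBLines p.1 l).map (fun ln => (ln, (() : Unit))))).contains p.2 = false := by
            simp only [PySem.Dict.contains_mk]
            simpa using fun x hx (hxe : x = p.2) => hmem (hxe ▸ hx)
          rw [PySem.Dict.items_insert_of_not_contains _ _ hc]
          simp only [hl, BEq.rfl, Bool.not_false, Bool.and_true, if_true]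
          simp
      rw [hidx]
      rw [PySem.Dict.items_insert_of_contains _ _ (by rw [hcont]; exact hf)]
      rw [ih, pvBFiles_append, if_pos hf, List.map_map]
      refine List.map_congr_left ?_
      intro f hfmem
      by_cases hq : (f == p.1) = true
      · have : f = p.1 := eq_of_beq hq
        subst this
        simp only [Function.comp, hq, if_true]
        rw [hinner]
      · have hne : f ≠ p.1 := fun h => hq (by subst h; simp)
        simp only [Function.comp, beq_iff_eq, if_neg hne]
        congr 2
        rw [pvBLines_append]
        have : (p.1 == f) = false := by simp [beq_eq_false_iff_ne]; exact fun h => hne h.symm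
        rw [this]; simp
    · -- new file: its inner dict is the singleton of p.2, and its scan over l is empty
      have hf' : (pvBFiles l).contains p.1 = false := by simpa using hf
      have hgetD : (pvIdx l).getD p.1 PySem.Dict.empty = PySem.Dict.empty := by
        rw [PySem.Dict.getD_eq_get?_getD, hget, if_neg (by rw [hf']; decide)]; rfl
      have hnotmem : p.1 ∉ pvBFiles l := by simpa using hf'
      have hnil : pvBLines p.1 l = [] := by
        apply pvBLines_nil
        rw [← pvBFiles_mem]
        exact hnotmem
      rw [hidx]
      rw [PySem.Dict.items_insert_of_not_contains _ _ (by rw [hcont]; exact hf')]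
      rw [ih, pvBFiles_append, if_neg (by rw [hf']; decide), List.map_append]
      congr 1
      · refine List.map_congr_left ?_
        intro f hfmem
        congr 2
        rw [pvBLines_append]
        have hne : f ≠ p.1 := by
          intro h; subst h
          exact hnotmem hfmem
        have : (p.1 == f) = false := by simp [beq_eq_false_iff_ne]; exact fun h => hne h.symm
        rw [this]; simp
      · simp only [List.map_cons, List.map_nil]
        rw [hgetD, pvBLines_append, hnil]
        simp only [BEq.rfl, List.contains_nil, Bool.not_false, Bool.and_true, if_true]
        have he : PySem.Dict.empty.insert p.2 () = PySem.Dict.mk [(p.2, ())] := by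
          apply PySem.Dict.ext
          rw [PySem.Dict.items_insert_of_not_contains _ _ (PySem.Dict.contains_empty p.2)]
          rfl
        rw [he]
        rfl

-- ===== VERDICT (by name: the statement is the Claim_ definition above) =====
theorem get_coverage_delta_spec : Claim_equal_get_coverage_delta := by
  intro lines coverage_pre coverage_post _
  unfold Spec_get_coverage_delta get_coverage_delta get_coverage_delta_alt
  have h := pvFold_comm (pvWrap coverage_pre) (pvWrap coverage_post) lines PySem.Dict.empty
  rw [show pvPhi (pvWrap coverage_pre) (pvWrap coverage_post) PySem.Dict.empty = PySem.Dict.empty from rfl] at h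
  simp only []
  rw [h]
  rw [show (lines.foldl (fun idx p => idx.insert p.1 ((idx.getD p.1 PySem.Dict.empty).insert p.2 ())) PySem.Dict.empty) = pvIdx lines from rfl]
  rw [show (pvPhi (pvWrap coverage_pre) (pvWrap coverage_post) (pvIdx lines)).items
      = (pvIdx lines).items.map (fun p => (p.1, (pvMapVal (fun ln _ => pvDelta (pvWrap coverage_pre) (pvWrap coverage_post) p.1 ln) p.2))) from rfl]
  rw [pvIdx_items, List.map_map, List.map_map]
  refine List.map_congr_left ?_
  intro f _
  simp [Function.comp, pvMapVal, pvDelta, List.map_map]
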